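-- pv_equiv track=rewrite | github.com/whatupmiked/vim-marc | python/mmmarc.py | single_mrc_21
-- ===== SOURCE A (Python) =====
-- def single_mrc_21(stdin):
--     '''
--     Converts a single mrk record into a
--     single-line record in the mrc format
--     and returns the string
--     '''
--     field_len = []
--     field_tag = []
--     field_offset = []
--     total_offset = 0
--     display_record = stdin
--     display_list = display_record.split('\n')
--     display_list.pop()
--     for i, value in enumerate(display_list[1:]):
--         # Convert to utf-8 to get the correct ASCII character length
--         field_len.append(len(display_list[i+1][5:].encode('utf-8')))
--         field_tag.append(display_list[i+1][1:4])
--     field_len = field_len[:-1]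
--     for value in field_len:
--         field_offset.append(total_offset)
--         total_offset += value
--     # Make Header
--     # Make Payload
--     record_dir = ""
--     for j, value in enumerate(field_offset):
--         record_dir += field_tag[j] + str(field_len[j]).zfill(4) + str(value).zfill(5)
--     # CALCULATED
--     ldr = display_list[0][6:]
--     ldr += record_dir
--     compiled_record = ''
--     eof_delimiter = '\x1d' #^]
--     field_delimiter = '\x1e' #^^
--     subfield_delimiter = '\x1f' #^_
--     for k in range(1, len(display_list)-1):
--         compiled_record += display_list[k].replace('$', subfield_delimiter)[6:] + field_delimiter
--     compiled_record += eof_delimiter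
--     compiled_record = ldr + field_delimiter + compiled_record
--     return compiled_record
-- ===== SOURCE B (Python) =====
-- def single_mrc_21(stdin):
--     '''
--     Converts a single mrk record into a
--     single-line record in the mrc format
--     and returns the string
--     '''
--     lines = stdin.split('\n')
--     lines.pop()
--     leader = lines[0][6:]
--     directory = []
--     payload = []
--     offset = 0
--     for field in lines[1:-1]:
--         byte_len = len(field[5:].encode('utf-8'))
--         directory.append(field[1:4] + str(byte_len).zfill(4) + str(offset).zfill(5))
--         payload.append(field.replace('$', '\x1f')[6:] + '\x1e')
--         offset += byte_len
--     return leader + ''.join(directory) + '\x1e' + ''.join(payload) + '\x1d'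
-- ===== Notes on version B (the rewrite author's own statement) =====
-- stated objective: simpler
-- what changed: B fuses A's four sequential loops and the three parallel index-addressed lists (field_len/field_tag/field_offset) into a single pass over the body fields lines[1:-1] that threads a running offset and builds the directory and payload together.
import Mathlib
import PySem

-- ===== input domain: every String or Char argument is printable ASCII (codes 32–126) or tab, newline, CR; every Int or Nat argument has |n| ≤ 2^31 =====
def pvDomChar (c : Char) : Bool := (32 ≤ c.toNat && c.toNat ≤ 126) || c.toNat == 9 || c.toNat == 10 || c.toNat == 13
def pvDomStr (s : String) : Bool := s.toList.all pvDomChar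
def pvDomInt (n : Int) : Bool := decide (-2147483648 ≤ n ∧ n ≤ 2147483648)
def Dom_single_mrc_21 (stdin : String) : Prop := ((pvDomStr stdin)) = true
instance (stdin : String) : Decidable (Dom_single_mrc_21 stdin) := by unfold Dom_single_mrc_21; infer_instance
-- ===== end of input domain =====

-- B fuses A's four loops and three parallel index-addressed lists into ONE pass over the body
-- fields with a running offset (objective: simpler); return values agree wherever A returns.
-- Note: len(….encode('utf-8')) is ported as character count, exact on the ASCII domain Dom_.

-- ===== PORT A =====
def single_mrc_21 (stdin : String) : String :=
  -- display_list = stdin.split('\n'); display_list.pop()  (split is never empty, pop() drops the last element)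
  let display_list := (PySem.Chars.splitOn stdin.toList ['\n']).dropLast
  -- first loop: field_len.append(len(display_list[i+1][5:].encode('utf-8'))); field_tag.append(display_list[i+1][1:4])
  let lt := (PySem.List.enumerate (PySem.List.slice display_list (some 1) none)).foldl
      (fun (acc : List Int × List (List Char)) iv =>
        (acc.1 ++ [PySem.Chars.len (PySem.Chars.slice (PySem.List.pyGetD display_list (iv.1 + 1) []) (some 5) none)],
         acc.2 ++ [PySem.Chars.slice (PySem.List.pyGetD display_list (iv.1 + 1) []) (some 1) (some 4)]))
      ([], [])
  let field_len := PySem.List.slice lt.1 none (some (-1))   -- field_len = field_len[:-1]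
  let field_tag := lt.2
  -- second loop: field_offset.append(total_offset); total_offset += value
  let ot := field_len.foldl (fun (acc : List Int × Int) v => (acc.1 ++ [acc.2], acc.2 + v)) ([], 0)
  let field_offset := ot.1
  -- third loop: record_dir += field_tag[j] + str(field_len[j]).zfill(4) + str(value).zfill(5)
  let record_dir := (PySem.List.enumerate field_offset).foldl
      (fun acc jv => acc ++ PySem.List.pyGetD field_tag jv.1 []
        ++ PySem.Chars.zfill (PySem.Int.toChars (PySem.List.pyGetD field_len jv.1 0)) 4
        ++ PySem.Chars.zfill (PySem.Int.toChars jv.2) 5) []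
  -- ldr = display_list[0][6:] + record_dir   (display_list[0] raises on empty list: excluded by Pre_)
  let ldr := PySem.Chars.slice (PySem.List.pyGetD display_list 0 []) (some 6) none ++ record_dir
  -- fourth loop: compiled_record += display_list[k].replace('$','\x1f')[6:] + '\x1e'
  let compiled := (PySem.List.pyRange 1 (PySem.List.len display_list - 1)).foldl
      (fun acc k => acc
        ++ PySem.Chars.slice (PySem.Chars.replace (PySem.List.pyGetD display_list k []) ['$'] ['\x1F']) (some 6) none
        ++ ['\x1E']) []
  String.ofList (ldr ++ ['\x1E'] ++ (compiled ++ ['\x1D']))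

-- ===== PORT B =====
def single_mrc_21_alt (stdin : String) : String :=
  -- lines = stdin.split('\n'); lines.pop()
  let lines := (PySem.Chars.splitOn stdin.toList ['\n']).dropLast
  let leader := PySem.Chars.slice (PySem.List.pyGetD lines 0 []) (some 6) none   -- lines[0][6:]
  -- one pass over lines[1:-1]: (directory, payload, offset)
  let dpo := (PySem.List.slice lines (some 1) (some (-1))).foldl
      (fun (acc : List (List Char) × List (List Char) × Int) field =>
        let byteLen := PySem.Chars.len (PySem.Chars.slice field (some 5) none)
        (acc.1 ++ [PySem.Chars.slice field (some 1) (some 4)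
                    ++ PySem.Chars.zfill (PySem.Int.toChars byteLen) 4
                    ++ PySem.Chars.zfill (PySem.Int.toChars acc.2.2) 5],
         acc.2.1 ++ [PySem.Chars.slice (PySem.Chars.replace field ['$'] ['\x1F']) (some 6) none ++ ['\x1E']],
         acc.2.2 + byteLen))
      ([], [], 0)
  String.ofList (leader ++ PySem.Chars.join [] dpo.1 ++ ['\x1E'] ++ PySem.Chars.join [] dpo.2.1 ++ ['\x1D'])

-- ===== PRECONDITION & SPEC =====
-- Python A raises IndexError (display_list[0] on an empty list) exactly when stdin contains no newline character.
def Pre_single_mrc_21 (stdin : String) : Prop := '\n' ∈ stdin.toList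
instance (stdin : String) : Decidable (Pre_single_mrc_21 stdin) := by unfold Pre_single_mrc_21; infer_instance
def pvWitness_single_mrc_21 : String := "=LDR  00000nam\n=245  10$aTitle\n=999  $x\n"
def Spec_single_mrc_21 (stdin : String) (out : String) : Prop := out = single_mrc_21_alt stdin
instance (stdin : String) (out : String) : Decidable (Spec_single_mrc_21 stdin out) := by unfold Spec_single_mrc_21; infer_instance

-- ===== CLAIM (what is proved, stated in full; the proofs are below) =====
def Claim_equal_single_mrc_21 : Prop := ∀ (stdin : String), Dom_single_mrc_21 stdin → Pre_single_mrc_21 stdin → Spec_single_mrc_21 stdin (single_mrc_21 stdin)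

-- ===== LEMMAS AND PROOFS =====

-- the shared per-field pieces
def pvLen (v : List Char) : Int := PySem.Chars.len (PySem.Chars.slice v (some 5) none)
def pvTag (v : List Char) : List Char := PySem.Chars.slice v (some 1) (some 4)
def pvEntry (v : List Char) (off : Int) : List Char :=
  pvTag v ++ PySem.Chars.zfill (PySem.Int.toChars (pvLen v)) 4 ++ PySem.Chars.zfill (PySem.Int.toChars off) 5
def pvPay (v : List Char) : List Char :=
  PySem.Chars.slice (PySem.Chars.replace v ['$'] ['\x1F']) (some 6) none ++ ['\x1E']
def pvEntries : List (List Char) → Int → List (List Char)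
  | [], _ => []
  | v :: r, off => pvEntry v off :: pvEntries r (off + pvLen v)
def pvOffs : List Int → Int → List Int
  | [], _ => []
  | v :: r, t => t :: pvOffs r (t + v)


-- length of the offset scan
theorem pvOffs_length (l : List Int) : ∀ t, (pvOffs l t).length = l.length := by
  induction l with
  | nil => intro t; rfl
  | cons v r ih => intro t; simp [pvOffs, ih]

-- xs[1:-1] as tail.dropLast
theorem pv_slice_one_neg_one (l : List (List Char)) :
    PySem.List.slice l (some 1) (some (-1)) = l.tail.dropLast := by
  rcases l with _ | ⟨x, m⟩
  · rfl
  · simp [PySem.List.slice, PySem.List.clampIdx, List.dropLast_eq_take]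
    rw [if_neg (by omega)]
    omega

-- ''.join(parts) is concatenation
theorem pv_join_nil (l : List (List Char)) : PySem.Chars.join [] l = l.flatten := by
  induction l with
  | nil => rfl
  | cons x r ih =>
    rcases r with _ | ⟨y, s⟩
    · simp [PySem.Chars.join, List.intercalate]
    · simp_all [PySem.Chars.join, List.intercalate, List.intersperse]

-- A's first loop, structural form
theorem pv_foldl_pair (l : List (List Char)) : ∀ (a : List Int) (b : List (List Char)),
    l.foldl (fun (acc : List Int × List (List Char)) v => (acc.1 ++ [pvLen v], acc.2 ++ [pvTag v])) (a, b)
      = (a ++ l.map pvLen, b ++ l.map pvTag) := by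
  induction l with
  | nil => intro a b; simp
  | cons v r ih => intro a b; simp [ih]

-- fold over enumerate using only the element is fold over the list
theorem pv_foldl_enum_snd {a b : Type} (g : b -> a -> b) (l : List a) (s : Int) (init : b) :
    (PySem.List.enumerate l s).foldl (fun acc iv => g acc iv.2) init = l.foldl g init := by
  conv_rhs => rw [<- PySem.List.map_snd_enumerate l s]
  rw [List.foldl_map]

-- A's first loop with its indexed access removed
theorem pv_loop1 (x : List Char) (M : List (List Char)) :
    (PySem.List.enumerate M 0).foldl
      (fun (acc : List Int × List (List Char)) iv =>
        (acc.1 ++ [PySem.Chars.len (PySem.Chars.slice (PySem.List.pyGetD (x :: M) (iv.1 + 1) []) (some 5) none)],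
         acc.2 ++ [PySem.Chars.slice (PySem.List.pyGetD (x :: M) (iv.1 + 1) []) (some 1) (some 4)]))
      ([], [])
    = (M.map pvLen, M.map pvTag) := by
  rw [PySem.List.foldl_congr_mem _ _
      (fun (acc : List Int × List (List Char)) (iv : Int × List Char) =>
        (acc.1 ++ [pvLen iv.2], acc.2 ++ [pvTag iv.2])) _ ?_]
  · exact (pv_foldl_enum_snd
      (fun (acc : List Int × List (List Char)) v => (acc.1 ++ [pvLen v], acc.2 ++ [pvTag v]))
      M 0 ([], [])).trans (pv_foldl_pair M [] [])
  · intro acc iv hiv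
    rcases (PySem.List.mem_enumerate_iff _ _ _).mp hiv with ⟨k, hk, rfl⟩
    have hidx : (0 : Int) + (k : Int) + 1 = ((k + 1 : Nat) : Int) := by push_cast; ring
    simp only [hidx, PySem.List.pyGetD_natCast]
    simp [pvLen, pvTag, List.getD, hk]

-- A's second loop
theorem pv_foldl_offs (l : List Int) : ∀ (a : List Int) (t : Int),
    l.foldl (fun (acc : List Int × Int) v => (acc.1 ++ [acc.2], acc.2 + v)) (a, t)
      = (a ++ pvOffs l t, t + l.sum) := by
  induction l with
  | nil => intro a t; simp [pvOffs]
  | cons v r ih => intro a t; simp [pvOffs, ih]; ring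

-- A's directory loop, generalized over the already-consumed prefix
theorem pv_dirM (body : List (List Char)) : ∀ (pre : List (List Char)) (off : Int) (acc : List Char),
    (PySem.List.enumerate (pvOffs (body.map pvLen) off) (pre.length : Int)).foldl
      (fun acc (jv : Int × Int) => acc ++ pvEntry ((pre ++ body).getD jv.1.toNat []) jv.2) acc
    = acc ++ (pvEntries body off).flatten := by
  induction body with
  | nil => intro pre off acc; simp [pvOffs, pvEntries]
  | cons v r ih =>
    intro pre off acc
    have hcons : pvOffs ((v :: r).map pvLen) off = off :: pvOffs (r.map pvLen) (off + pvLen v) := by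
      simp [pvOffs]
    rw [hcons, PySem.List.enumerate_cons, List.foldl_cons]
    have hget : ((pre ++ v :: r).getD ((pre.length : Int)).toNat []) = v := by
      simp [List.getD]
    have hlen : (pre.length : Int) + 1 = ((pre ++ [v]).length : Int) := by simp
    have happ : pre ++ v :: r = (pre ++ [v]) ++ r := by simp
    rw [hget, hlen, happ, ih (pre ++ [v]) (off + pvLen v) (acc ++ pvEntry v off)]
    simp [pvEntries]

-- A's directory loop in its port form
theorem pv_loop3 (M : List (List Char)) :
    (PySem.List.enumerate (pvOffs ((M.dropLast).map pvLen) 0) 0).foldl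
      (fun acc (jv : Int × Int) => acc ++ PySem.List.pyGetD (M.map pvTag) jv.1 []
        ++ PySem.Chars.zfill (PySem.Int.toChars (PySem.List.pyGetD ((M.dropLast).map pvLen) jv.1 0)) 4
        ++ PySem.Chars.zfill (PySem.Int.toChars jv.2) 5) []
    = (pvEntries M.dropLast 0).flatten := by
  rw [PySem.List.foldl_congr_mem _ _
      (fun (acc : List Char) (jv : Int × Int) =>
        acc ++ pvEntry ((([] : List (List Char)) ++ M.dropLast).getD jv.1.toNat []) jv.2) _ ?_]
  · have := pv_dirM M.dropLast [] 0 []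
    simpa using this
  · intro acc jv hjv
    rcases (PySem.List.mem_enumerate_iff _ _ _).mp hjv with ⟨k, hk, rfl⟩
    rw [pvOffs_length, List.length_map] at hk
    have hk' : k < M.length := by
      have hdl : M.dropLast.length = M.length - 1 := List.length_dropLast
      omega
    have hcast : ((0 : Int) + (k : Int)) = ((k : Nat) : Int) := by ring
    simp only [hcast, PySem.List.pyGetD_natCast, Int.toNat_natCast]
    have e2 : M.dropLast[k]?.getD [] = M[k] := by
      rw [List.getElem?_eq_getElem hk]; simp [List.getElem_dropLast]
    have hkm : k < (List.map pvLen M).dropLast.length := by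
      have h3 : M.dropLast.length = M.length - 1 := List.length_dropLast
      simp only [List.length_dropLast, List.length_map]
      omega
    have e1 : (List.map pvLen M).dropLast[k]?.getD 0 = pvLen M[k] := by
      rw [List.getElem?_eq_getElem hkm]
      have := List.getElem_dropLast (xs := List.map pvLen M) (i := k) hkm
      simp_all
    simp [pvEntry, List.getD, hk', List.append_assoc, e1, e2]

-- A's payload loop
theorem pv_loop4 (x : List Char) (M : List (List Char)) :
    (PySem.List.pyRange 1 (PySem.List.len (x :: M) - 1)).foldl
      (fun acc k => acc
        ++ PySem.Chars.slice (PySem.Chars.replace (PySem.List.pyGetD (x :: M) k []) ['$'] ['\x1F']) (some 6) none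
        ++ ['\x1E']) []
    = (M.dropLast).flatMap pvPay := by
  have hlen : PySem.List.len (x :: M) - 1 = PySem.List.len ((x :: M).dropLast) := by
    simp [PySem.List.len]
  rw [hlen, PySem.List.foldl_congr_mem _ _
      (fun (acc : List Char) (j : Int) => acc ++ pvPay (PySem.List.pyGetD ((x :: M).dropLast) j [])) _ ?_]
  · rw [PySem.List.foldl_pyRange_pyGetD ((x :: M).dropLast) [] (fun acc v => acc ++ pvPay v) [] (by omega : (0:Int) ≤ 1)]
    have hdrop : List.drop (1 : Int).toNat ((x :: M).dropLast) = M.dropLast := by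
      cases M <;> simp
    rw [hdrop, PySem.List.foldl_append_eq_flatMap]
    simp
  · intro acc j hj
    obtain ⟨h1, h2⟩ := PySem.List.mem_pyRange_one.mp hj
    rw [PySem.List.len] at h2
    have hj' : j = ((j.toNat : Nat) : Int) := by omega
    rw [hj']
    simp only [PySem.List.pyGetD_natCast]
    have hk : j.toNat < (x :: M).dropLast.length := by omega
    have hk2 : j.toNat < (x :: M).length := by
      have hdl : (x :: M).dropLast.length = (x :: M).length - 1 := List.length_dropLast
      omega
    have e : (x :: M).dropLast[j.toNat]?.getD [] = (x :: M)[j.toNat]?.getD [] := by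
      rw [List.getElem?_eq_getElem hk, List.getElem?_eq_getElem hk2]
      simp [List.getElem_dropLast]
    simp [pvPay, List.getD, e, List.append_assoc]

-- B's single pass
theorem pv_loopB (body : List (List Char)) : ∀ (a b : List (List Char)) (t : Int),
    body.foldl (fun (acc : List (List Char) × List (List Char) × Int) field =>
      (acc.1 ++ [PySem.Chars.slice field (some 1) (some 4)
          ++ PySem.Chars.zfill (PySem.Int.toChars (PySem.Chars.len (PySem.Chars.slice field (some 5) none))) 4
          ++ PySem.Chars.zfill (PySem.Int.toChars acc.2.2) 5],
       acc.2.1 ++ [PySem.Chars.slice (PySem.Chars.replace field ['$'] ['\x1F']) (some 6) none ++ ['\x1E']],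
       acc.2.2 + PySem.Chars.len (PySem.Chars.slice field (some 5) none))) (a, b, t)
    = (a ++ pvEntries body t, b ++ body.map pvPay, t + (body.map pvLen).sum) := by
  induction body with
  | nil => intro a b t; simp [pvEntries]
  | cons v r ih =>
    intro a b t
    simp only [List.foldl_cons, ih]
    simp [pvEntries, pvEntry, pvTag, pvLen, pvPay]
    ring

theorem single_mrc_21_spec : Claim_equal_single_mrc_21 := by
  intro stdin _ _
  unfold Spec_single_mrc_21 single_mrc_21 single_mrc_21_alt
  simp only []
  generalize (PySem.Chars.splitOn stdin.toList ['\n']).dropLast = L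
  cases L with
  | nil => rfl
  | cons x M =>
    rw [PySem.List.slice_from_one, pv_slice_one_neg_one]
    simp only [List.tail_cons]
    rw [pv_loop1]
    rw [PySem.List.slice_to_neg_one, ← List.map_dropLast,
        pv_foldl_offs (M.dropLast.map pvLen) [] 0]
    simp only [List.nil_append]
    rw [pv_loop3, pv_loop4, pv_loopB M.dropLast [] [] 0]
    simp only [List.nil_append]
    rw [pv_join_nil, pv_join_nil]
    simp [List.flatMap_def, List.append_assoc]
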